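-- pv_equiv track=rewrite | github.com/Guffawaffle/LoquiLex | loquilex/security/path_sanitizer.py | _is_reserved_windows_name
-- ===== SOURCE A (Python) =====
-- def _is_reserved_windows_name(name: str) -> bool:
--     """Check if filename is a reserved Windows device name."""
--     base = name.split(".")[0].upper()
--     reserved = {
--         "CON",
--         "PRN",
--         "AUX",
--         "NUL",
--         *(f"COM{i}" for i in range(1, 10)),
--         *(f"LPT{i}" for i in range(1, 10)),
--     }
--     return base in reserved
-- ===== SOURCE B (Python) =====
-- def _is_reserved_windows_name(name: str) -> bool:
--     """Check if filename is a reserved Windows device name."""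
--     base = name.split(".")[0].upper()
--     if base in ("CON", "PRN", "AUX", "NUL"):
--         return True
--     return len(base) == 4 and base[:3] in ("COM", "LPT") and base[3] in "123456789"
-- ===== Notes on version B (the rewrite author's own statement) =====
-- stated objective: simpler
-- what changed: Replaces A's enumerated 22-element reserved set with a structural rule: the four fixed names CON/PRN/AUX/NUL, else length 4 with prefix COM or LPT and a trailing digit 1-9.
import Mathlib
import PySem

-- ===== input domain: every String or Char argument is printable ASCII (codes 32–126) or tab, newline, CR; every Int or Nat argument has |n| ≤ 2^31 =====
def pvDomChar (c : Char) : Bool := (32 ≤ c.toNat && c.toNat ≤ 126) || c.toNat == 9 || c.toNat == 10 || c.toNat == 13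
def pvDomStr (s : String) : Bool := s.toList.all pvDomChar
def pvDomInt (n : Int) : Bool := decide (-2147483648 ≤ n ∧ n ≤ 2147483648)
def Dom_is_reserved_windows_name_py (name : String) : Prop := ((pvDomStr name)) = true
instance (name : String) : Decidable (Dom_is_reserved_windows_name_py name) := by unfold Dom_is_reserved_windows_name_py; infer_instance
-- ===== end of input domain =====

-- ===== PORT A =====
-- B is a simpler decomposition: the four fixed device names plus a COM/LPT prefix + digit-1..9 rule,
-- replacing A's enumerated 22-element set (objective: simpler; no speed claim).
-- Both ports work on List Char via PySem.Chars (exact on the ASCII domain).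
def is_reserved_windows_name_py (name : String) : Bool :=
  let base := PySem.Chars.upper ((PySem.Chars.splitOn name.toList ['.']).headD [])
  -- split with a nonempty separator always returns at least one piece, so [0] is the head
  let reserved : PySem.Set (List Char) := PySem.Set.ofList
    ([['C','O','N'], ['P','R','N'], ['A','U','X'], ['N','U','L']]
      ++ (PySem.List.pyRange 1 10 1).map (fun i => ['C','O','M'] ++ PySem.Int.toChars i)
      ++ (PySem.List.pyRange 1 10 1).map (fun i => ['L','P','T'] ++ PySem.Int.toChars i))
  PySem.Set.contains reserved base

-- ===== PORT B =====
def is_reserved_windows_name_py_alt (name : String) : Bool :=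
  let base := PySem.Chars.upper ((PySem.Chars.splitOn name.toList ['.']).headD [])
  if base = ['C','O','N'] || base = ['P','R','N'] || base = ['A','U','X'] || base = ['N','U','L'] then
    true
  else
    (PySem.Chars.len base == 4)
    && (PySem.Chars.slice base none (some 3) = ['C','O','M']
        || PySem.Chars.slice base none (some 3) = ['L','P','T'])
    && (match PySem.List.pyGet? base 3 with
        | some d => PySem.Chars.isIn [d] "123456789".toList
        | none => false)  -- unreachable: guarded by len == 4 (Python's short-circuit `and`)

-- ===== PRECONDITION & SPEC =====
def Spec_is_reserved_windows_name_py (name : String) (out : Bool) : Prop := out = is_reserved_windows_name_py_alt name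
instance (name : String) (out : Bool) : Decidable (Spec_is_reserved_windows_name_py name out) := by unfold Spec_is_reserved_windows_name_py; infer_instance

-- ===== CLAIM (what is proved, stated in full; the proofs are below) =====
def Claim_equal_is_reserved_windows_name_py : Prop := ∀ (name : String), Dom_is_reserved_windows_name_py name → Spec_is_reserved_windows_name_py name (is_reserved_windows_name_py name)

-- ===== LEMMAS AND PROOFS =====

-- the two bodies agree on every possible `base` (an arbitrary List Char)
set_option maxRecDepth 8192 in
lemma pv_core (l : List Char) :
    PySem.Set.contains (PySem.Set.ofList
      ([['C','O','N'], ['P','R','N'], ['A','U','X'], ['N','U','L']]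
        ++ (PySem.List.pyRange 1 10 1).map (fun i => ['C','O','M'] ++ PySem.Int.toChars i)
        ++ (PySem.List.pyRange 1 10 1).map (fun i => ['L','P','T'] ++ PySem.Int.toChars i))) l
    = (if l = ['C','O','N'] || l = ['P','R','N'] || l = ['A','U','X'] || l = ['N','U','L'] then
        true
      else
        (PySem.Chars.len l == 4)
        && (PySem.Chars.slice l none (some 3) = ['C','O','M']
            || PySem.Chars.slice l none (some 3) = ['L','P','T'])
        && (match PySem.List.pyGet? l 3 with
            | some d => PySem.Chars.isIn [d] "123456789".toList
            | none => false)) := by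
  rw [show (PySem.Set.ofList
      ([['C','O','N'], ['P','R','N'], ['A','U','X'], ['N','U','L']]
        ++ (PySem.List.pyRange 1 10 1).map (fun i => ['C','O','M'] ++ PySem.Int.toChars i)
        ++ (PySem.List.pyRange 1 10 1).map (fun i => ['L','P','T'] ++ PySem.Int.toChars i))
      : List (List Char))
    = [['C','O','N'], ['P','R','N'], ['A','U','X'], ['N','U','L'],
       ['C','O','M','1'], ['C','O','M','2'], ['C','O','M','3'], ['C','O','M','4'], ['C','O','M','5'],
       ['C','O','M','6'], ['C','O','M','7'], ['C','O','M','8'], ['C','O','M','9'],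
       ['L','P','T','1'], ['L','P','T','2'], ['L','P','T','3'], ['L','P','T','4'], ['L','P','T','5'],
       ['L','P','T','6'], ['L','P','T','7'], ['L','P','T','8'], ['L','P','T','9']] from by decide]
  have hdig : ∀ d : Char, PySem.Chars.isIn [d] ['1','2','3','4','5','6','7','8','9']
      = (d = '1' ∨ d = '2' ∨ d = '3' ∨ d = '4' ∨ d = '5' ∨ d = '6' ∨ d = '7' ∨ d = '8' ∨ d = '9') := fun d => by
    rw [Bool.eq_iff_iff, PySem.Chars.isIn_iff_infix, List.singleton_infix_iff]
    simp [List.mem_cons]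
  rcases l with _ | ⟨a, _ | ⟨b, _ | ⟨c, _ | ⟨d, _ | ⟨e, t⟩⟩⟩⟩⟩
  · decide
  · simp [PySem.Set.contains, List.mem_cons, PySem.Chars.len]
  · simp [PySem.Set.contains, List.mem_cons, PySem.Chars.len]
  · -- length 3: both sides are the four fixed names
    simp [PySem.Set.contains, List.mem_cons, PySem.Chars.len, Bool.or_assoc]
  · -- length 4: the COM/LPT family
    rw [Bool.eq_iff_iff]
    simp [PySem.Set.contains, List.mem_cons, PySem.Chars.len, PySem.Chars.slice,
      PySem.List.slice, PySem.List.pyGet?, PySem.List.pyIdx?, hdig]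
    constructor
    · rintro (⟨rfl,rfl,rfl,rfl⟩|⟨rfl,rfl,rfl,rfl⟩|⟨rfl,rfl,rfl,rfl⟩|⟨rfl,rfl,rfl,rfl⟩|
        ⟨rfl,rfl,rfl,rfl⟩|⟨rfl,rfl,rfl,rfl⟩|⟨rfl,rfl,rfl,rfl⟩|⟨rfl,rfl,rfl,rfl⟩|
        ⟨rfl,rfl,rfl,rfl⟩|⟨rfl,rfl,rfl,rfl⟩|⟨rfl,rfl,rfl,rfl⟩|⟨rfl,rfl,rfl,rfl⟩|
        ⟨rfl,rfl,rfl,rfl⟩|⟨rfl,rfl,rfl,rfl⟩|⟨rfl,rfl,rfl,rfl⟩|⟨rfl,rfl,rfl,rfl⟩|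
        ⟨rfl,rfl,rfl,rfl⟩|⟨rfl,rfl,rfl,rfl⟩) <;> simp
    · rintro ⟨⟨rfl,rfl,rfl⟩|⟨rfl,rfl,rfl⟩, rfl|rfl|rfl|rfl|rfl|rfl|rfl|rfl|rfl⟩ <;> simp
  · -- length ≥ 5: neither side matches
    simp [PySem.Set.contains, List.mem_cons, PySem.Chars.len]
    omega

-- ===== VERDICT (by name: the statement is the Claim_ definition above) =====
theorem is_reserved_windows_name_py_spec : Claim_equal_is_reserved_windows_name_py := by
  intro name _
  unfold Spec_is_reserved_windows_name_py is_reserved_windows_name_py is_reserved_windows_name_py_alt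
  exact pv_core _
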